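-- pv_equiv track=rewrite | github.com/giorgospanay/scisci-gatekeepers | src/oa-infomap.py | rank_bridge_actors
-- ===== SOURCE A (Python) =====
-- from collections import defaultdict
--
-- def rank_bridge_actors(multilayer_coms: dict, topk: int = 100):
--     """
--     Identify actors that sit in overlaps of multilayer modules.
--     Score = number of multilayer modules the actor appears in.
--     Returns dict[community_id] -> list[actor ids ranked]
--     """
--     # build actor -> membership count
--     actor_to_count = defaultdict(int)
--     for cid, nodes in multilayer_coms.items():
--         for v in nodes:
--             actor_to_count[v] += 1
--
--     results = {}
--     for cid, nodes in multilayer_coms.items():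
--         scored = [(v, actor_to_count[v]) for v in nodes]
--         scored.sort(key=lambda x: x[1], reverse=True)
--         results[cid] = [v for v, c in scored[:topk] if c > 1]  # only true overlaps
--     return results
-- ===== SOURCE B (Python) =====
-- def rank_bridge_actors(multilayer_coms: dict, topk: int = 100):
--     """
--     Identify actors that sit in overlaps of multilayer modules.
--     Score = number of multilayer modules the actor appears in.
--     Returns dict[community_id] -> list[actor ids ranked]
--
--     Counting happens once; within each community actors are grouped into
--     buckets keyed by their membership count (overlap actors only), and the
--     buckets are emitted from highest count down, truncated to the top k.
--     """
--     counts = {}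
--     for nodes in multilayer_coms.values():
--         for v in nodes:
--             counts[v] = counts.get(v, 0) + 1
--
--     results = {}
--     for cid, nodes in multilayer_coms.items():
--         buckets = {}
--         for v in nodes:
--             c = counts[v]
--             if c > 1:
--                 buckets.setdefault(c, []).append(v)
--         ranked = []
--         for c in sorted(buckets, reverse=True):
--             ranked += buckets[c]
--         results[cid] = ranked[:topk]
--     return results
-- ===== Notes on version B (the rewrite author's own statement) =====
-- stated objective: alternative
-- what changed: Replaces the per-community stable comparison sort of all (actor, count) pairs by a bucket-grouping pass: overlap actors (count > 1) are grouped into buckets keyed by membership count, only the distinct counts present are sorted, and buckets are concatenated high-to-low and truncated to topk; Pre_ restricts topk to non-negative values, the natural domain of a top-k count, where negative topk makes A's slice wrap against the unfiltered community size while B's wraps against the filtered list.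
-- outside the precondition, e.g. on rank_bridge_actors({1: [1, 2], 2: [1, 3]}, -1): A returns {1: [1], 2: [1]}, B returns {1: [], 2: []}
import Mathlib
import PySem

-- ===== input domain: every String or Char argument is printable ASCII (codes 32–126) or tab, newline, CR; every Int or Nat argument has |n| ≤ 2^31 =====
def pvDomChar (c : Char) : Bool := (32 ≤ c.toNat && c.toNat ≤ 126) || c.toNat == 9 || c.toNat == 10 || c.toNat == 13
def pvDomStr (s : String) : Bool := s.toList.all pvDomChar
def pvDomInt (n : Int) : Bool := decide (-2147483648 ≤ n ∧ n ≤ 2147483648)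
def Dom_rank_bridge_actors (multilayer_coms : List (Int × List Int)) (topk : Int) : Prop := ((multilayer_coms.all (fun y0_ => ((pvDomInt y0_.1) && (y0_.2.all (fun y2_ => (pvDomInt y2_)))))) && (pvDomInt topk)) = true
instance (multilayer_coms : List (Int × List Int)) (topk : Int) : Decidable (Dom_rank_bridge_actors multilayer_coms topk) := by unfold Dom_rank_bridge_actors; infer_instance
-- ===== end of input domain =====

-- B replaces the per-community comparison sort by count-keyed buckets emitted
-- high-to-low; Pre_ restricts topk to the natural non-negative top-k counts.

-- ===== PORT A =====
def rank_bridge_actors (multilayer_coms : List (Int × List Int)) (topk : Int) : List (Int × List Int) :=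
  let items := (PySem.Dict.ofList multilayer_coms).items
  -- actor_to_count: defaultdict(int), += 1 per occurrence
  let a2c : PySem.Dict Int Int :=
    items.foldl (fun d p => p.2.foldl (fun d v => d.modify v 0 (· + 1)) d) PySem.Dict.empty
  let results : PySem.Dict Int (List Int) :=
    items.foldl (fun r p =>
      let scored := p.2.map (fun v => (v, a2c.getD v 0))
      let scored := PySem.List.sorted scored (fun x => x.2) true
      r.insert p.1 (((PySem.List.slice scored none (some topk)).filter
        (fun x => decide (1 < x.2))).map (fun x => x.1))) PySem.Dict.empty
  results.items

-- ===== PORT B =====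
def rank_bridge_actors_alt (multilayer_coms : List (Int × List Int)) (topk : Int) : List (Int × List Int) :=
  let items := (PySem.Dict.ofList multilayer_coms).items
  let counts : PySem.Dict Int Int :=
    (PySem.Dict.ofList multilayer_coms).values.foldl
      (fun d nodes => nodes.foldl (fun d v => d.insert v (d.getD v 0 + 1)) d) PySem.Dict.empty
  let results : PySem.Dict Int (List Int) :=
    items.foldl (fun r p =>
      let buckets := p.2.foldl (fun (d : PySem.Dict Int (List Int)) v =>
          let c := counts.getD v 0
          if 1 < c then d.modify c [] (· ++ [v]) else d) PySem.Dict.empty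
      let ranked := (PySem.List.sorted buckets.keys (fun x => x) true).foldl
          (fun acc c => acc ++ buckets.getD c []) []
      r.insert p.1 (PySem.List.slice ranked none (some topk))) PySem.Dict.empty
  results.items

-- ===== PRECONDITION & SPEC =====
-- Pre_ restricts topk to non-negative values, the natural domain of a top-k count;
-- for negative topk A's slice wraps against the unfiltered community size, an
-- artefact B's filtered list cannot reproduce naturally.
def Pre_rank_bridge_actors (multilayer_coms : List (Int × List Int)) (topk : Int) : Prop := 0 ≤ topk
instance (multilayer_coms : List (Int × List Int)) (topk : Int) : Decidable (Pre_rank_bridge_actors multilayer_coms topk) := by unfold Pre_rank_bridge_actors; infer_instance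
def pvWitness_rank_bridge_actors : (List (Int × List Int)) × Int := ([(1, [1, 2]), (2, [1, 3])], 2)
def Spec_rank_bridge_actors (multilayer_coms : List (Int × List Int)) (topk : Int) (out : List (Int × List Int)) : Prop := out = rank_bridge_actors_alt multilayer_coms topk
instance (multilayer_coms : List (Int × List Int)) (topk : Int) (out : List (Int × List Int)) : Decidable (Spec_rank_bridge_actors multilayer_coms topk out) := by unfold Spec_rank_bridge_actors; infer_instance

-- ===== CLAIM (what is proved, stated in full; the proofs are below) =====
def Claim_equal_rank_bridge_actors : Prop := ∀ (multilayer_coms : List (Int × List Int)) (topk : Int), Dom_rank_bridge_actors multilayer_coms topk → Pre_rank_bridge_actors multilayer_coms topk → Spec_rank_bridge_actors multilayer_coms topk (rank_bridge_actors multilayer_coms topk)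

-- ===== LEMMAS AND PROOFS =====

def pvBuckets (cs : List Int) (xs : List (Int × Int)) : List (Int × Int) :=
  cs.flatMap (fun c => xs.filter (fun x => decide (x.2 = c)))

theorem pv_insertBy_append {α : Type} (before : α → α → Bool) (x : α) (F L : List α)
    (h : ∀ y ∈ F, before x y = false) :
    PySem.List.insertBy before x (F ++ L) = F ++ PySem.List.insertBy before x L := by
  induction F with
  | nil => rfl
  | cons y F ih =>
    simp only [List.cons_append, PySem.List.insertBy, h y (by simp)]
    simp only [Bool.false_eq_true, if_false, List.cons.injEq, true_and]
    exact ih (fun z hz => h z (by simp [hz]))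

theorem pv_insertBy_cons_of_true {α : Type} (before : α → α → Bool) (x : α) (L : List α)
    (h : ∀ y ∈ L, before x y = true) :
    PySem.List.insertBy before x L = x :: L := by
  cases L with
  | nil => rfl
  | cons y L => simp [PySem.List.insertBy, h y (by simp)]

theorem pv_mem_pvBuckets {cs : List Int} {xs : List (Int × Int)} {y : Int × Int}
    (h : y ∈ pvBuckets cs xs) : y.2 ∈ cs ∧ y ∈ xs := by
  simp only [pvBuckets, List.mem_flatMap, List.mem_filter, decide_eq_true_eq] at h
  obtain ⟨c, hc, hy, hyc⟩ := h
  exact ⟨hyc ▸ hc, hy⟩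

theorem pv_pvBuckets_append_not_mem (cs : List Int) (xs : List (Int × Int)) (x : Int × Int)
    (h : x.2 ∉ cs) : pvBuckets cs (xs ++ [x]) = pvBuckets cs xs := by
  unfold pvBuckets
  apply List.flatMap_congr
  intro c hc
  have : ¬ (x.2 = c) := fun he => h (he ▸ hc)
  simp [List.filter_append, this]

theorem pv_insertBy_pvBuckets (cs : List Int) (xs : List (Int × Int)) (x : Int × Int)
    (hp : cs.Pairwise (· > ·)) (hm : x.2 ∈ cs) :
    PySem.List.insertBy (fun a b => decide (b.2 < a.2)) x (pvBuckets cs xs)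
      = pvBuckets cs (xs ++ [x]) := by
  induction cs with
  | nil => simp at hm
  | cons c cs ih =>
    have hgt : ∀ c' ∈ cs, c > c' := fun c' hc' => (List.pairwise_cons.mp hp).1 c' hc'
    have hFL : pvBuckets (c :: cs) xs
        = xs.filter (fun y => decide (y.2 = c)) ++ pvBuckets cs xs := by
      simp [pvBuckets]
    rw [hFL]
    by_cases hxc : x.2 = c
    · -- x lands at the end of bucket c
      have hxnotcs : x.2 ∉ cs := fun hin => absurd (hgt _ hin) (by omega)
      rw [pv_insertBy_append _ _ _ _ (by
        intro y hy
        have : y.2 = c := by simpa using (List.mem_filter.mp hy).2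
        simp [this, hxc])]
      rw [pv_insertBy_cons_of_true _ _ _ (by
        intro y hy
        have h2 := (pv_mem_pvBuckets hy).1
        have := hgt _ h2
        simp [hxc]; omega)]
      have : pvBuckets (c :: cs) (xs ++ [x])
          = (xs.filter (fun y => decide (y.2 = c)) ++ [x]) ++ pvBuckets cs (xs ++ [x]) := by
        simp [pvBuckets, List.filter_append, hxc]
      rw [this, pv_pvBuckets_append_not_mem cs xs x hxnotcs]
      simp
    · -- x belongs further down
      have hxcs : x.2 ∈ cs := by cases (List.mem_cons.mp hm) with
        | inl h => exact absurd h hxc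
        | inr h => exact h
      have hxlt : x.2 < c := hgt _ hxcs
      rw [pv_insertBy_append _ _ _ _ (by
        intro y hy
        have : y.2 = c := by simpa using (List.mem_filter.mp hy).2
        simp [this]; omega)]
      rw [ih (List.Pairwise.sublist (List.sublist_cons_self c cs) hp) hxcs]
      simp [pvBuckets, List.filter_append, hxc]

theorem pv_sorted_eq_pvBuckets (xs : List (Int × Int)) (cs : List Int)
    (hp : cs.Pairwise (· > ·)) (hc : ∀ x ∈ xs, x.2 ∈ cs) :
    PySem.List.sorted xs (fun x => x.2) true = pvBuckets cs xs := by
  rw [PySem.List.sorted_rev_eq_foldl_insertBy]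
  induction xs using List.reverseRecOn with
  | nil => simp [pvBuckets]
  | append_singleton xs x ih =>
    rw [List.foldl_append, List.foldl_cons, List.foldl_nil,
      ih (fun y hy => hc y (by simp [hy])),
      pv_insertBy_pvBuckets cs xs x hp (hc x (by simp))]

theorem pv_bucket_getD (f : Int → Int) (l : List Int) (c : Int) :
    ((l.foldl (fun d v => d.modify (f v) [] (· ++ [v])) (PySem.Dict.empty : PySem.Dict Int (List Int)))).getD c []
      = l.filter (fun v => decide (f v = c)) := by
  have h1 : l.foldl (fun d v => d.modify (f v) [] (· ++ [v])) (PySem.Dict.empty : PySem.Dict Int (List Int))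
      = (l.map (fun v => (f v, v))).foldl (fun d p => d.modify p.1 [] (· ++ [p.2])) PySem.Dict.empty := by
    rw [List.foldl_map]
  rw [h1, PySem.Dict.getD_foldl_modify_append]
  simp [List.filter_map, Function.comp_def]
  exact List.filter_congr (fun v _ => Bool.beq_eq_decide_eq _ _)

theorem pv_guardfold (f : Int → Int) (nodes : List Int) (d : PySem.Dict Int (List Int)) :
    nodes.foldl (fun d v => if 1 < f v then d.modify (f v) [] (· ++ [v]) else d) d
      = (nodes.filter (fun v => decide (1 < f v))).foldl
          (fun d v => d.modify (f v) [] (· ++ [v])) d := by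
  induction nodes generalizing d with
  | nil => simp
  | cons v nodes ih =>
    by_cases h : 1 < f v
    · simp [h, ih]
    · simp [h, ih]

theorem pv_community (f : Int → Int) (nodes : List Int) (topk : Int) (ht : 0 ≤ topk)
    (hf : ∀ v ∈ nodes, 1 ≤ f v) :
    (((PySem.List.slice (PySem.List.sorted (nodes.map (fun v => (v, f v))) (fun x => x.2) true)
        none (some topk)).filter (fun x => decide (1 < x.2))).map (fun x => x.1))
    = (let buckets := nodes.foldl (fun (d : PySem.Dict Int (List Int)) v =>
          if 1 < f v then d.modify (f v) [] (· ++ [v]) else d) PySem.Dict.empty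
       let ranked := (PySem.List.sorted buckets.keys (fun x => x) true).foldl
          (fun acc c => acc ++ buckets.getD c []) []
       PySem.List.slice ranked none (some topk)) := by
  simp only [pv_guardfold]
  set l := nodes.filter (fun v => decide (1 < f v)) with hl
  set scored := nodes.map (fun v => (v, f v)) with hscored
  set bk := l.foldl (fun d v => d.modify (f v) [] (· ++ [v]))
    (PySem.Dict.empty : PySem.Dict Int (List Int)) with hbk
  set cs := PySem.List.sorted bk.keys (fun x => x) true with hcs
  have hknodup : bk.keys.Nodup := by
    rw [hbk]
    exact PySem.Dict.nodup_keys_foldl_modify_key l f [] (fun _ v => (· ++ [v]))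
      PySem.Dict.empty (by simp)
  have hkeys_mem : ∀ c : Int, c ∈ bk.keys ↔ c ∈ l.map f := by
    intro c
    rw [hbk, PySem.Dict.keys_foldl_modify_key l f [] (fun _ v => (· ++ [v]))]
    simp [PySem.Set.mem_update]
  have hmemcs : ∀ c : Int, c ∈ cs ↔ c ∈ l.map f := by
    intro c
    rw [hcs, PySem.List.mem_sorted]
    exact hkeys_mem c
  have hgt1 : ∀ c ∈ cs, 1 < c := by
    intro c hc
    obtain ⟨v, hv, rfl⟩ := List.mem_map.mp ((hmemcs c).mp hc)
    exact of_decide_eq_true (List.mem_filter.mp (hl ▸ hv : v ∈ nodes.filter (fun v => decide (1 < f v)))).2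
  have hcs_pw : cs.Pairwise (· > ·) := by
    have h1 := PySem.List.sorted_pairwise_rev bk.keys (fun x => x)
    have h2 : cs.Nodup := ((PySem.List.sorted_perm bk.keys (fun x : Int => x) true).nodup_iff).mpr hknodup
    rw [← hcs] at h1
    exact (h1.and h2).imp (by rintro a b ⟨hle, hne⟩; omega)
  have hranked : cs.foldl (fun acc c => acc ++ bk.getD c []) []
      = cs.flatMap (fun c => nodes.filter (fun v => decide (f v = c))) := by
    rw [PySem.List.foldl_append_eq_flatMap, List.nil_append]
    apply List.flatMap_congr
    intro c hc
    have hc2 : 1 < c := hgt1 c hc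
    rw [hbk, pv_bucket_getD]
    rw [hl, List.filter_filter]
    apply List.filter_congr
    intro v _
    by_cases hvc : f v = c
    · simp [hvc]; omega
    · simp [hvc]
  set R := cs.flatMap (fun c => nodes.filter (fun v => decide (f v = c))) with hR
  rw [hranked]
  set P := pvBuckets cs scored with hP
  set Q := scored.filter (fun x => decide (x.2 = 1)) with hQ
  have hsorted : PySem.List.sorted scored (fun x => x.2) true = P ++ Q := by
    have hpw : (cs ++ [1]).Pairwise (· > ·) := by
      rw [List.pairwise_append]
      refine ⟨hcs_pw, by simp, ?_⟩
      intro a ha b hb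
      simp only [List.mem_singleton] at hb
      subst hb
      exact hgt1 a ha
    have hcover : ∀ x ∈ scored, x.2 ∈ cs ++ [1] := by
      intro x hx
      rw [hscored] at hx
      obtain ⟨v, hv, rfl⟩ := List.mem_map.mp hx
      rcases lt_or_eq_of_le (hf v hv) with h1 | h1
      · refine List.mem_append.mpr (Or.inl ((hmemcs _).mpr ?_))
        exact List.mem_map.mpr ⟨v, List.mem_filter.mpr ⟨hv, by simpa using h1⟩, rfl⟩
      · exact List.mem_append.mpr (Or.inr (by simp [← h1]))
    rw [pv_sorted_eq_pvBuckets scored _ hpw hcover]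
    rw [hP, hQ]
    simp [pvBuckets]
  have hmapP : P.map (fun x => x.1) = R := by
    rw [hP, hR, pvBuckets, List.map_flatMap]
    apply List.flatMap_congr
    intro c hc
    rw [hscored, List.filter_map, List.map_map]
    simp [Function.comp_def]
  rw [hsorted, PySem.List.slice_to _ ht, PySem.List.slice_to R ht]
  rw [List.take_append, List.filter_append, List.map_append]
  have hfP : (P.take topk.toNat).filter (fun x => decide (1 < x.2))
      = P.take topk.toNat := by
    apply List.filter_eq_self.mpr
    intro a ha
    have haP := List.mem_of_mem_take ha
    have := (pv_mem_pvBuckets (hP ▸ haP)).1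
    simpa using hgt1 a.2 this
  have hfQ : (Q.take (topk.toNat - P.length)).filter
      (fun x => decide (1 < x.2)) = [] := by
    apply List.filter_eq_nil_iff.mpr
    intro a ha
    have haQ := List.mem_of_mem_take ha
    have h1 := (List.mem_filter.mp (hQ ▸ haQ)).2
    simp at h1
    simp [h1]
  rw [hfP, hfQ, List.map_nil, List.append_nil, List.map_take, hmapP]

theorem pv_countA (items : List (Int × List Int)) (d : PySem.Dict Int Int) (v : Int) :
    (items.foldl (fun d p => p.2.foldl (fun d v => d.modify v 0 (· + 1)) d) d).getD v 0
      = d.getD v 0 + ((items.flatMap (fun p => p.2)).count v : Int) := by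
  induction items generalizing d with
  | nil => simp
  | cons p items ih =>
    simp only [List.foldl_cons, List.flatMap_cons, List.count_append, ih,
      PySem.Dict.getD_foldl_modify_add_one]
    push_cast; ring

theorem pv_countB (items : List (Int × List Int)) (d : PySem.Dict Int Int) (v : Int) :
    (items.foldl (fun d p => p.2.foldl (fun d v => d.insert v (d.getD v 0 + 1)) d) d).getD v 0
      = d.getD v 0 + ((items.flatMap (fun p => p.2)).count v : Int) := by
  induction items generalizing d with
  | nil => simp
  | cons p items ih =>
    simp only [List.foldl_cons, List.flatMap_cons, List.count_append, ih,
      PySem.Dict.getD_foldl_insert_add_one]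
    push_cast; ring

-- ===== VERDICT (by name: the statement is the Claim_ definition above) =====
theorem rank_bridge_actors_spec : Claim_equal_rank_bridge_actors := by
  intro coms topk _dom hpre
  unfold Spec_rank_bridge_actors rank_bridge_actors rank_bridge_actors_alt
  set items := (PySem.Dict.ofList coms).items with hitems
  set f : Int → Int := fun v => ((items.flatMap (fun p => p.2)).count v : Int) with hfdef
  have hnodup : (items.map (fun p : Int × List Int => p.1)).Nodup :=
    PySem.Dict.nodup_keys_ofList coms
  have hA : ∀ v : Int,
      (items.foldl (fun d p => p.2.foldl (fun d v => d.modify v 0 (· + 1)) d)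
        (PySem.Dict.empty : PySem.Dict Int Int)).getD v 0 = f v := by
    intro v; rw [pv_countA]; simp [hfdef]
  have hB : ∀ v : Int,
      ((PySem.Dict.ofList coms).values.foldl
        (fun d nodes => nodes.foldl (fun d v => d.insert v (d.getD v 0 + 1)) d)
        (PySem.Dict.empty : PySem.Dict Int Int)).getD v 0 = f v := by
    intro v
    have hv : (PySem.Dict.ofList coms).values = items.map (fun p => p.2) := rfl
    rw [hv, List.foldl_map, pv_countB]
    simp [hfdef]
  rw [PySem.Dict.items_foldl_insert_fresh items (fun p => p.1) _ PySem.Dict.empty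
      (fun a _ => PySem.Dict.contains_empty _) hnodup,
    PySem.Dict.items_foldl_insert_fresh items (fun p => p.1) _ PySem.Dict.empty
      (fun a _ => PySem.Dict.contains_empty _) hnodup]
  apply List.map_congr_left
  intro p hp
  have hf : ∀ v ∈ p.2, 1 ≤ f v := by
    intro v hv
    have : v ∈ items.flatMap (fun p => p.2) := List.mem_flatMap.mpr ⟨p, hp, hv⟩
    have h1 : 0 < (items.flatMap (fun p => p.2)).count v := List.count_pos_iff.mpr this
    simp only [hfdef]
    exact_mod_cast h1
  have hmapA : (fun v => (v, (items.foldl (fun d p => p.2.foldl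
      (fun d v => d.modify v 0 (· + 1)) d) (PySem.Dict.empty : PySem.Dict Int Int)).getD v 0))
      = fun v => (v, f v) := funext (fun v => by rw [hA v])
  have hstepB : (fun (d : PySem.Dict Int (List Int)) v =>
        let c := ((PySem.Dict.ofList coms).values.foldl
          (fun d nodes => nodes.foldl (fun d v => d.insert v (d.getD v 0 + 1)) d)
          (PySem.Dict.empty : PySem.Dict Int Int)).getD v 0
        if 1 < c then d.modify c [] (· ++ [v]) else d)
      = fun (d : PySem.Dict Int (List Int)) v =>
        if 1 < f v then d.modify (f v) [] (· ++ [v]) else d := by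
    funext d v
    simp only [hB v]
  simp only [hmapA, hstepB]
  exact congrArg (fun r => (p.1, r)) (pv_community f p.2 topk hpre hf)
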